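-- pv_equiv track=rewrite | github.com/aamaredia/interviews | rectangle/solution.py | find_rectangle
-- ===== SOURCE A (Python) =====
-- def reverse_index(list_, element):
--     return len(list_) - list_[::-1].index(element) - 1
--
-- def find_rectangle(image):
--     for x_position, row in enumerate(image):
--         if sum(row) != len(row):
--             first_y_position = row.index(0)
--             first = (x_position, first_y_position)
--             break
--     else:
--         # Even though problem given assumed a rectangle always exists
--         raise Exception('No rectangle found')
--
--     for x_position, row in enumerate(image[first[0]:], start=first[0]):
--         if sum(row) != len(row):
--             last = (x_position, reverse_index(row, 0))
--         else:
--             break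
--
--     return first, last
-- ===== SOURCE B (Python) =====
-- def find_rectangle(image):
--     flags = [sum(row) != len(row) for row in image]
--     if True not in flags:
--         raise Exception('No rectangle found')
--     start = flags.index(True)
--     try:
--         end = flags.index(False, start) - 1
--     except ValueError:
--         end = len(image) - 1
--     top, bottom = image[start], image[end]
--     first = (start, top.index(0))
--     last = (end, len(bottom) - 1 - bottom[::-1].index(0))
--     return first, last
-- ===== Notes on version B (the rewrite author's own statement) =====
-- stated objective: alternative
-- what changed: B precomputes one boolean mask [sum(row)!=len(row) for row in image] and finds both corner row indices by pure list.index arithmetic on that mask (with try/except for the run extending to the bottom), touching only the block's top and bottom rows, instead of A's two staged enumerate loops with break/for-else that reassign `last` and recompute reverse_index on every block row.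
import Mathlib
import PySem

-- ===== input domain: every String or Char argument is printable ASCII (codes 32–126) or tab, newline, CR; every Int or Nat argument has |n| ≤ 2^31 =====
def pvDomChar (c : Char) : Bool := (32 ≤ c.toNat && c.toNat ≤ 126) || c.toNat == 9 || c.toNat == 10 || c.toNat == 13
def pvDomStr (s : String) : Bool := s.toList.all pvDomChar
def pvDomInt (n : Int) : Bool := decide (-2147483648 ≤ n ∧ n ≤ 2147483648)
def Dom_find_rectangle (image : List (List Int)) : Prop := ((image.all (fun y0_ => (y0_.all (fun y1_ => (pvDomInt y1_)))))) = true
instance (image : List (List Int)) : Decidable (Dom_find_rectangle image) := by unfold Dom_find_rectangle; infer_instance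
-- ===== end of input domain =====

-- B replaces A's two enumerate-loops-with-break by a precomputed boolean mask of the rows
-- plus pure index arithmetic on that mask (list.index), touching only the block's top and
-- bottom rows. Where the Python raises (no non-uniform row, or a block row without a 0)
-- the ports return the junk value ((0,0),(0,0)); Pre_ excludes exactly those inputs.

-- ===== PORT A =====
-- reverse_index: len(l) - l[::-1].index(e) - 1; l[::-1] is l.reverse.
-- .getD 0 stands for the ValueError path (e ∉ l), excluded by Pre_.
def pyReverseIndex (l : List Int) (e : Int) : Int :=
  (l.length : Int) - (((PySem.List.index? l.reverse e).getD 0 : Nat) : Int) - 1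

-- first loop of A: enumerate(image), break at the first row with sum(row) != len(row);
-- none = the raise paths (for-else Exception, or row.index(0) ValueError).
def findFirstLoop : List (List Int) → Nat → Option (Nat × Nat)
  | [], _ => none
  | r :: rest, x =>
      if r.sum ≠ (r.length : Int) then
        (PySem.List.index? r 0).map (fun y => (x, y))
      else findFirstLoop rest (x + 1)

-- second loop of A over image[first[0]:] with start=first[0]; `last` is the accumulator.
def findLastLoop : List (List Int) → Nat → Int × Int → Int × Int
  | [], _, last => last
  | r :: rest, x, last =>
      if r.sum ≠ (r.length : Int) then
        findLastLoop rest (x + 1) ((x : Int), pyReverseIndex r 0)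
      else last

def find_rectangle (image : List (List Int)) : (Int × Int) × (Int × Int) :=
  match findFirstLoop image 0 with
  | none => ((0, 0), (0, 0))   -- raise Exception('No rectangle found') / ValueError, excluded by Pre_
  | some (x, y) =>
      let first : Int × Int := ((x : Int), (y : Int))
      -- image[first[0]:] with first[0] = x ≥ 0 is image.drop x (PySem.List.slice_from)
      (first, findLastLoop (image.drop x) x first)

-- ===== PORT B =====
-- flags = [sum(row) != len(row) for row in image]; start = flags.index(True);
-- flags.index(False, start) is start + first False position in flags[start:] (same scan);
-- the try/except ValueError becomes the match on the Option.
def find_rectangle_alt (image : List (List Int)) : (Int × Int) × (Int × Int) :=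
  let flags := image.map (fun r => decide (r.sum ≠ (r.length : Int)))
  if true ∈ flags then
    let start := (PySem.List.index? flags true).getD 0
    let endIdx : Int :=
      match PySem.List.index? (flags.drop start) false with
      | some j => (start : Int) + (j : Int) - 1
      | none => (image.length : Int) - 1
    let top := (PySem.List.pyGet? image (start : Int)).getD []
    let bottom := (PySem.List.pyGet? image endIdx).getD []
    -- top.index(0) / bottom[::-1].index(0): .getD 0 is the ValueError path, excluded by Pre_
    (((start : Int), (((PySem.List.index? top 0).getD 0 : Nat) : Int)),
     (endIdx, (bottom.length : Int) - 1 - (((PySem.List.index? bottom.reverse 0).getD 0 : Nat) : Int)))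
  else ((0, 0), (0, 0))   -- raise Exception('No rectangle found'), excluded by Pre_

-- ===== PRECONDITION & SPEC =====
-- Pre_: exactly the inputs on which the Python A returns (no exception): some row is not
-- all-covered (sum ≠ len), and every row of the contiguous non-uniform block starting there
-- contains a 0 (otherwise A's list.index(0)/reverse_index raises ValueError).
def Pre_find_rectangle (image : List (List Int)) : Prop :=
  (∃ r ∈ image, r.sum ≠ (r.length : Int)) ∧
  ∀ r ∈ (image.dropWhile (fun r => decide (r.sum = (r.length : Int)))).takeWhile
          (fun r => !decide (r.sum = (r.length : Int))), (0 : Int) ∈ r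
instance (image : List (List Int)) : Decidable (Pre_find_rectangle image) := by
  unfold Pre_find_rectangle; infer_instance

def pvWitness_find_rectangle : List (List Int) := [[1, 1, 1], [1, 0, 0], [1, 0, 0]]

def Spec_find_rectangle (image : List (List Int)) (out : (Int × Int) × (Int × Int)) : Prop := out = find_rectangle_alt image
instance (image : List (List Int)) (out : (Int × Int) × (Int × Int)) : Decidable (Spec_find_rectangle image out) := by unfold Spec_find_rectangle; infer_instance

-- ===== CLAIM (what is proved, stated in full; the proofs are below) =====
def Claim_equal_find_rectangle : Prop := ∀ (image : List (List Int)), Dom_find_rectangle image → Pre_find_rectangle image → Spec_find_rectangle image (find_rectangle image)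

-- ===== LEMMAS AND PROOFS =====

-- findFirstLoop scans exactly to the first row failing the predicate sum(row) == len(row)
theorem first_scan (l : List (List Int)) (i : Nat) :
    findFirstLoop l i =
      (match l.dropWhile (fun r => decide (r.sum = (r.length : Int))) with
        | [] => none
        | r :: _ => (PySem.List.index? r 0).map
            (fun y => (i + (l.takeWhile (fun r => decide (r.sum = (r.length : Int)))).length, y))) := by
  induction l generalizing i with
  | nil => rfl
  | cons a t ih =>
    by_cases h : a.sum = (a.length : Int)
    · simp only [findFirstLoop, List.dropWhile_cons, List.takeWhile_cons, h, decide_true,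
        if_pos, ite_not]
      rw [ih (i + 1)]
      cases hd : t.dropWhile (fun r => decide (r.sum = (r.length : Int))) with
      | nil => simp
      | cons r rs =>
        have e : ∀ L : Nat, i + 1 + L = i + (L + 1) := fun L => by omega
        simp [e]
    · simp [findFirstLoop, h]

-- bBlock: the contiguous block of non-uniform rows (used only to state/relate the scans)
def bBlock : List (List Int) → List (List Int)
  | [] => []
  | r :: rest => if r.sum = (r.length : Int) then [] else r :: bBlock rest

theorem bBlock_eq_takeWhile (l : List (List Int)) :
    bBlock l = l.takeWhile (fun r => !decide (r.sum = (r.length : Int))) := by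
  induction l with
  | nil => rfl
  | cons a t ih => by_cases h : a.sum = (a.length : Int) <;> simp [bBlock, h, ih]

theorem findLastLoop_of_bBlock_nil (l : List (List Int)) (x : Nat) (init : Int × Int)
    (h : bBlock l = []) : findLastLoop l x init = init := by
  cases l with
  | nil => rfl
  | cons a t =>
    by_cases ha : a.sum = (a.length : Int)
    · simp [findLastLoop, ha]
    · simp [bBlock, ha] at h

-- the second loop of A ends with (x + block-length - 1, reverse_index of the block's last row)
theorem last_scan (l : List (List Int)) (x : Nat) (init : Int × Int)
    (h : bBlock l ≠ []) :
    findLastLoop l x init =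
      ((x : Int) + ((bBlock l).length : Int) - 1, pyReverseIndex ((bBlock l).getLastD []) 0) := by
  induction l generalizing x init with
  | nil => simp [bBlock] at h
  | cons a t ih =>
    by_cases ha : a.sum = (a.length : Int)
    · simp [bBlock, ha] at h
    · simp only [bBlock, ha, reduceIte]
      simp only [findLastLoop, ha, ne_eq, not_false_eq_true, reduceIte]
      by_cases hb : bBlock t = []
      · rw [findLastLoop_of_bBlock_nil t (x + 1) _ hb, hb]
        simp
      · rw [ih (x + 1) _ hb]
        rcases List.exists_cons_of_ne_nil hb with ⟨b, bs, hbs⟩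
        simp only [Prod.mk.injEq]
        refine ⟨by push_cast [List.length_cons]; ring, ?_⟩
        congr 1
        rw [List.getLastD_cons, hbs, List.getLastD_cons, List.getLastD_cons]

-- position of the first `true` in a mapped flag list = length of the leading all-false run
theorem index?_map_true (q : List Int → Bool) (l : List (List Int))
    (h : l.dropWhile (fun r => !q r) ≠ []) :
    PySem.List.index? (l.map q) true = some (l.takeWhile (fun r => !q r)).length := by
  induction l with
  | nil => simp at h
  | cons a t ih =>
    by_cases ha : q a = true
    · simp only [List.map_cons, ha, List.takeWhile_cons, Bool.not_true]
      exact PySem.List.index?_cons_self _ _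
    · have ha' : q a = false := by simpa using ha
      simp only [List.dropWhile_cons, ha', Bool.not_false, reduceIte] at h
      simp only [List.map_cons, List.takeWhile_cons, ha', Bool.not_false, reduceIte]
      rw [PySem.List.index?_cons_of_ne _ (by simp), ih h]
      simp

-- position of the first `false` in a mapped flag list = length of the leading all-true run
theorem index?_map_false (q : List Int → Bool) (l : List (List Int)) :
    PySem.List.index? (l.map q) false =
      (match l.dropWhile q with
        | [] => none
        | _ :: _ => some (l.takeWhile q).length) := by
  induction l with
  | nil => rfl
  | cons a t ih =>
    by_cases ha : q a = true
    · simp only [List.map_cons, List.dropWhile_cons, List.takeWhile_cons, ha, reduceIte]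
      rw [PySem.List.index?_cons_of_ne _ (by simp), ih]
      cases t.dropWhile q <;> simp
    · have ha' : q a = false := by simpa using ha
      simp only [List.map_cons, List.dropWhile_cons, List.takeWhile_cons, ha']
      exact PySem.List.index?_cons_self _ _

-- ===== VERDICT (by name: the statement is the Claim_ definition above) =====
theorem find_rectangle_spec : Claim_equal_find_rectangle := by
  intro image _ hpre
  rcases hpre with ⟨hex, hblk⟩
  set p : List Int → Bool := fun r => decide (r.sum = (r.length : Int)) with hp
  set q : List Int → Bool := fun r => decide (r.sum ≠ (r.length : Int)) with hq
  have hqp : ∀ r, q r = !p r := fun r => by simp [hp, hq, decide_not]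
  have hdw : image.dropWhile p ≠ [] := by
    intro hnil
    rcases hex with ⟨r, hr, hrs⟩
    have := (List.dropWhile_eq_nil_iff).mp hnil r hr
    simp [hp] at this
    exact hrs this
  rcases List.exists_cons_of_ne_nil hdw with ⟨r, rest, hd⟩
  have hpr : p r = false := by
    have := List.head?_dropWhile_not p image
    rw [hd] at this; simpa using this
  have hprs : ¬ (r.sum = (r.length : Int)) := by simpa [hp] using hpr
  set t := (image.takeWhile p).length with ht
  have hdrop : image.drop t = r :: rest := by
    calc image.drop t
        = (image.takeWhile p ++ image.dropWhile p).drop (image.takeWhile p).length := by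
          rw [List.takeWhile_append_dropWhile]
      _ = image.dropWhile p := by rw [List.drop_left]
      _ = r :: rest := hd
  have hbb : bBlock (r :: rest) = r :: bBlock rest := by simp [bBlock, hprs]
  have hbne : bBlock (r :: rest) ≠ [] := by rw [hbb]; simp
  have hBtw : bBlock (r :: rest) = (r :: rest).takeWhile (fun r => !p r) := by
    rw [bBlock_eq_takeWhile]
  have hblk' : ∀ row ∈ bBlock (r :: rest), (0 : Int) ∈ row := by
    intro row hrow
    apply hblk
    rw [hd, ← hBtw]
    simpa [hp] using hrow
  have h0r : (0 : Int) ∈ r := hblk' r (by rw [hbb]; simp)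
  rcases Option.isSome_iff_exists.mp ((PySem.List.index?_isSome_iff r 0).mpr h0r) with ⟨k, hk⟩
  -- evaluate port A
  have hA : find_rectangle image =
      (((t : Int), (k : Int)),
        (((t : Int) + ((bBlock (r :: rest)).length : Int) - 1),
          pyReverseIndex ((bBlock (r :: rest)).getLastD []) 0)) := by
    unfold find_rectangle
    rw [first_scan image 0, hd]
    simp only [hk, Option.map_some, Nat.zero_add]
    rw [hdrop, last_scan _ _ _ hbne]
  -- index arithmetic for port B
  have hqmap : image.map q = image.map (fun r => !p r) := by
    rw [show q = (fun r => !p r) from funext hqp]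
  have hdwq : image.dropWhile (fun r => !(!p r)) ≠ [] := by
    simpa [Bool.not_not] using hdw
  have hidxT : PySem.List.index? (image.map q) true = some t := by
    rw [hqmap, index?_map_true (fun r => !p r) image hdwq]
    congr 1
    simp [Bool.not_not, ht]
  have hmemT : true ∈ image.map q := by
    exact (PySem.List.index?_isSome_iff _ _).mp (by rw [hidxT]; rfl)
  have hdropflags : (image.map q).drop t = (r :: rest).map (fun r => !p r) := by
    rw [hqmap, ← List.map_drop, hdrop]
  have hBlen_pos : 1 ≤ (bBlock (r :: rest)).length := by
    rw [hbb]; simp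
  have hlen_split : image.length = t + (r :: rest).length := by
    conv_lhs => rw [← List.takeWhile_append_dropWhile (p := p) (l := image)]
    rw [List.length_append, hd]
  -- endIdx = t + block length - 1 in both branches
  have hendIdx :
      (match PySem.List.index? ((image.map q).drop t) false with
        | some j => ((t : Nat) : Int) + (j : Int) - 1
        | none => (image.length : Int) - 1) =
      (t : Int) + ((bBlock (r :: rest)).length : Int) - 1 := by
    rw [hdropflags, index?_map_false]
    cases hdq : (r :: rest).dropWhile (fun r => !p r) with
    | nil =>
      have htw : (r :: rest).takeWhile (fun r => !p r) = r :: rest := by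
        conv_rhs => rw [← List.takeWhile_append_dropWhile (p := fun r => !p r) (l := r :: rest)]
        rw [hdq, List.append_nil]
      have hBl : (bBlock (r :: rest)).length = (r :: rest).length := by rw [hBtw, htw]
      simp only [hBl]
      rw [hlen_split]
      push_cast
      ring
    | cons d ds =>
      simp only [← hBtw]
  -- bottom row fetched by index = last row of the block
  have hbotget : (PySem.List.pyGet? image
        ((t : Int) + ((bBlock (r :: rest)).length : Int) - 1)).getD [] =
      (bBlock (r :: rest)).getLastD [] := by
    have hcast : (t : Int) + ((bBlock (r :: rest)).length : Int) - 1 =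
        ((t + ((bBlock (r :: rest)).length - 1) : Nat) : Int) := by
      push_cast [Nat.cast_sub hBlen_pos]; ring
    rw [hcast, PySem.List.pyGet?_natCast, ← List.getElem?_drop, hdrop]
    have hpre : bBlock (r :: rest) <+: r :: rest := by
      rw [hBtw]; exact List.takeWhile_prefix _
    obtain ⟨sfx, hs⟩ := hpre
    rw [List.getLastD_eq_getLast?, List.getLast?_eq_getElem?]
    generalize hG : bBlock (r :: rest) = Bk at hs hBlen_pos ⊢
    rw [← hs, List.getElem?_append_left (by omega)]
  -- top row fetched by index = first row of the block
  have htopget : (PySem.List.pyGet? image ((t : Nat) : Int)).getD [] = r := by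
    rw [PySem.List.pyGet?_natCast, ← List.head?_drop, hdrop]; rfl
  -- evaluate port B
  have hBv : find_rectangle_alt image =
      (((t : Int), (k : Int)),
        ((t : Int) + ((bBlock (r :: rest)).length : Int) - 1,
          (((bBlock (r :: rest)).getLastD []).length : Int) - 1 -
            (((PySem.List.index? ((bBlock (r :: rest)).getLastD []).reverse 0).getD 0 : Nat) : Int))) := by
    unfold find_rectangle_alt
    simp only [← hq]
    rw [if_pos hmemT, hidxT]
    simp only [Option.getD_some]
    rw [hendIdx, htopget, hbotget, hk]
    simp only [Option.getD_some]
  -- both sides agree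
  unfold Spec_find_rectangle
  rw [hA, hBv]
  have hlast : pyReverseIndex ((bBlock (r :: rest)).getLastD []) 0 =
      (((bBlock (r :: rest)).getLastD []).length : Int) - 1 -
        (((PySem.List.index? ((bBlock (r :: rest)).getLastD []).reverse 0).getD 0 : Nat) : Int) := by
    unfold pyReverseIndex; ring
  rw [hlast]
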